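-- pv_equiv track=rewrite | github.com/materialsproject/emmet | emmet-core/emmet/core/band_theory.py | _coarse_list_superset
-- ===== SOURCE A (Python) =====
-- def _coarse_list_superset(test: list, ref: list) -> bool:
--     diff_len = len(test) - len(ref)
--     if test[:diff_len] == ref or test[diff_len:] == ref:
--         return True
--     for i in range(1, diff_len):
--         if test[i : len(ref) + i] == ref:
--             return True
--     return False
-- ===== SOURCE B (Python) =====
-- def _coarse_list_superset(test: list, ref: list) -> bool:
--     # Rabin-Karp-style search with an exact rolling window sum as the
--     # fingerprint: slide a window of len(ref) over test maintaining its sum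
--     # in O(1), and only compare the window to ref when the sums agree.
--     # Correct because equal lists have equal sums, and every sum hit is
--     # verified by a direct comparison.  (Also examines offset 0, which A's
--     # first check misses; see the stated intended difference.)
--     n, m = len(test), len(ref)
--     if m > n:
--         return False
--     target = sum(ref)
--     window = sum(test[:m])
--     for i in range(n - m + 1):
--         if i:
--             window += test[i + m - 1] - test[i - 1]
--         if window == target and test[i:i + m] == ref:
--             return True
--     return False
-- ===== Notes on version B (the rewrite author's own statement) =====
-- stated objective: alternative
-- what changed: B replaces A's compare-a-slice-at-every-offset search by a Rabin-Karp-style scan that maintains an exact rolling window sum in O(1) per offset and compares the window to ref only when the sums match; it also examines offset 0, which A's first check misses.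
-- intended difference: When ref is a nonempty proper prefix of test that occurs nowhere at offset >= 1 and len(test) != 2*len(ref), A returns False (its first check tests test[:diff_len]==ref instead of test[:len(ref)]==ref, so offset 0 is never examined) while B returns True, which is the intended value since ref is a contiguous sublist of test. — e.g. on _coarse_list_superset([1, 2, 3], [1, 2]): A returns false, B returns true
import Mathlib
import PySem

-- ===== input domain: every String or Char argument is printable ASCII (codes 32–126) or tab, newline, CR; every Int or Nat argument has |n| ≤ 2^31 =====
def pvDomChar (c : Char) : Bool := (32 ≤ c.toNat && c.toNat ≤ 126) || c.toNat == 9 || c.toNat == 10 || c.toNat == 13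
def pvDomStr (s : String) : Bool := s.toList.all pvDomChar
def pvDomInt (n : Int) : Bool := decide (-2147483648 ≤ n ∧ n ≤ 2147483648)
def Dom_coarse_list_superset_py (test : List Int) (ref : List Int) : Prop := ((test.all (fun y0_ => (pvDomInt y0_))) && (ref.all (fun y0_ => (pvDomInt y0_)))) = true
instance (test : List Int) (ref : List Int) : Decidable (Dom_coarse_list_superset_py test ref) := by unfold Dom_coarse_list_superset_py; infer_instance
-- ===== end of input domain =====

-- B: Rabin-Karp-style search keyed on an exact rolling window sum (compare a
-- window to ref only when its sum matches ref's sum); B also examines offset 0,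
-- which A's first check misses (see D_ below).

-- ===== PORT A =====
def coarse_list_superset_py (test : List Int) (ref : List Int) : Bool :=
  let diff_len : Int := (test.length : Int) - (ref.length : Int)
  if PySem.List.slice test none (some diff_len) == ref
      || PySem.List.slice test (some diff_len) none == ref then true
  else
    (PySem.List.pyRange 1 diff_len 1).any
      (fun i => PySem.List.slice test (some i) (some ((ref.length : Int) + i)) == ref)

-- ===== PORT B =====
-- the 'for i in range(n - m + 1)' loop of Source B: cnt offsets remain, i is the
-- current offset, w is the window sum carried over from the previous iteration;
-- test[i+m-1] / test[i-1] are in range whenever i ≥ 1 and i + m ≤ len(test),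
-- which the loop bounds guarantee, so getD with default 0 is exact here, and
-- test[i:i+m] (nonnegative clamped slice) is exactly (test.drop i).take m
def rkLoop (test ref : List Int) (target : Int) (m : Nat) : Nat → Nat → Int → Bool
  | 0, _, _ => false
  | cnt + 1, i, w =>
    let w' := if i == 0 then w else w + test.getD (i + m - 1) 0 - test.getD (i - 1) 0
    if w' == target && ((test.drop i).take m == ref) then true
    else rkLoop test ref target m cnt (i + 1) w'

def coarse_list_superset_py_alt (test : List Int) (ref : List Int) : Bool :=
  let n := test.length
  let m := ref.length
  if m > n then false
  else rkLoop test ref ref.sum m (n - m + 1) 0 (test.take m).sum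

-- ===== PRECONDITION & SPEC =====
-- When ref is a nonempty proper prefix of test occurring nowhere at offset ≥ 1 and
-- len(test) ≠ 2*len(ref), A returns False (it tests test[:diff_len]==ref instead of
-- test[:len(ref)]==ref, so offset 0 is never examined) while B returns True, the
-- intended value since ref is a contiguous sublist of test.
def D_coarse_list_superset_py (test : List Int) (ref : List Int) : Prop :=
  ref ≠ [] ∧ ref <+: test ∧ ref.length ≠ test.length ∧
    test.length ≠ 2 * ref.length ∧ ¬ (ref <:+: test.drop 1)
instance (test : List Int) (ref : List Int) : Decidable (D_coarse_list_superset_py test ref) := by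
  unfold D_coarse_list_superset_py; infer_instance

def Spec_coarse_list_superset_py (test : List Int) (ref : List Int) (out : Bool) : Prop :=
  ¬ D_coarse_list_superset_py test ref → out = coarse_list_superset_py_alt test ref
instance (test : List Int) (ref : List Int) (out : Bool) : Decidable (Spec_coarse_list_superset_py test ref out) := by
  unfold Spec_coarse_list_superset_py; infer_instance

def pvDiffWitness_coarse_list_superset_py : List Int × List Int := ([1, 2, 3], [1, 2])
def pvDiffWitnessOut_coarse_list_superset_py : Bool × Bool := (false, true)

-- ===== CLAIM (what is proved, stated in full; the proofs are below) =====
def Claim_unchanged_coarse_list_superset_py : Prop := ∀ (test : List Int) (ref : List Int), Dom_coarse_list_superset_py test ref → Spec_coarse_list_superset_py test ref (coarse_list_superset_py test ref)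
def Claim_changed_coarse_list_superset_py : Prop := Dom_coarse_list_superset_py (pvDiffWitness_coarse_list_superset_py.1) (pvDiffWitness_coarse_list_superset_py.2) ∧ D_coarse_list_superset_py (pvDiffWitness_coarse_list_superset_py.1) (pvDiffWitness_coarse_list_superset_py.2) ∧ coarse_list_superset_py (pvDiffWitness_coarse_list_superset_py.1) (pvDiffWitness_coarse_list_superset_py.2) = pvDiffWitnessOut_coarse_list_superset_py.1 ∧ coarse_list_superset_py_alt (pvDiffWitness_coarse_list_superset_py.1) (pvDiffWitness_coarse_list_superset_py.2) = pvDiffWitnessOut_coarse_list_superset_py.2 ∧ pvDiffWitnessOut_coarse_list_superset_py.1 ≠ pvDiffWitnessOut_coarse_list_superset_py.2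
def Claim_exact_coarse_list_superset_py : Prop := ∀ (test : List Int) (ref : List Int), Dom_coarse_list_superset_py test ref → D_coarse_list_superset_py test ref → coarse_list_superset_py test ref ≠ coarse_list_superset_py_alt test ref

-- ===== LEMMAS AND PROOFS =====

/-- ref occurs in test at offset i. -/
def occAt (test ref : List Int) (i : Nat) : Prop := (test.drop i).take ref.length = ref

/-- sum of the window of length m at offset i -/
def winSum (test : List Int) (m i : Nat) : Int := ((test.drop i).take m).sum

lemma winSum_eq_prefix (test : List Int) (m i : Nat) :
    winSum test m i = (test.take (i + m)).sum - (test.take i).sum := by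
  unfold winSum
  rw [List.take_add, List.sum_append]
  ring

lemma winSum_update (test : List Int) (m i : Nat) (h1 : 1 ≤ i) (h2 : i + m ≤ test.length) :
    winSum test m i = winSum test m (i - 1) + test.getD (i + m - 1) 0 - test.getD (i - 1) 0 := by
  cases m with
  | zero =>
    simp [winSum]
  | succ m' =>
    have hb1 : i + m' < test.length := by omega
    have hb2 : i - 1 < test.length := by omega
    have e1 : (test.take (i + (m' + 1))).sum = (test.take (i + m')).sum + test[i + m'] := by
      rw [show i + (m' + 1) = (i + m') + 1 from by omega]
      exact List.sum_take_succ _ _ hb1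
    have e2 : (test.take i).sum = (test.take (i - 1)).sum + test[i - 1] := by
      conv_lhs => rw [show i = (i - 1) + 1 from by omega]
      exact List.sum_take_succ _ _ hb2
    have e4 : test.getD (i + (m' + 1) - 1) 0 = test[i + m'] := by
      rw [show i + (m' + 1) - 1 = i + m' from by omega]
      exact List.getD_eq_getElem test 0 hb1
    have e5 : test.getD (i - 1) 0 = test[i - 1] := List.getD_eq_getElem test 0 hb2
    rw [winSum_eq_prefix, winSum_eq_prefix, e1, e2,
      show i - 1 + (m' + 1) = i + m' from by omega, e4, e5]
    ring

lemma winSum_of_occAt (test ref : List Int) (i : Nat) (h : occAt test ref i) :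
    winSum test ref.length i = ref.sum := by
  unfold winSum; rw [h]

lemma rkLoop_iff (test ref : List Int) :
    ∀ (cnt i : Nat) (w : Int),
      i + cnt = test.length - ref.length + 1 →
      ref.length ≤ test.length →
      w = winSum test ref.length (i - 1) →
      (rkLoop test ref ref.sum ref.length cnt i w = true ↔
        ∃ k, k < cnt ∧ occAt test ref (i + k)) := by
  intro cnt
  induction cnt with
  | zero => intro i w _ _ _; simp [rkLoop]
  | succ c ih =>
    intro i w hcnt hmn hw
    simp only [rkLoop]
    have hile : i ≤ test.length - ref.length := by omega
    have hw' : (if i == 0 then w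
        else w + test.getD (i + ref.length - 1) 0 - test.getD (i - 1) 0)
        = winSum test ref.length i := by
      by_cases hi0 : i = 0
      · subst hi0; simpa using hw
      · rw [if_neg (by simpa using hi0), hw]
        exact (winSum_update test ref.length i (by omega) (by omega)).symm
    rw [hw']
    by_cases hocc : occAt test ref i
    · rw [if_pos]
      · exact iff_of_true rfl ⟨0, by omega, by simpa using hocc⟩
      · simp only [Bool.and_eq_true, beq_iff_eq]
        exact ⟨winSum_of_occAt test ref i hocc, hocc⟩
    · have hcheck : (winSum test ref.length i == ref.sum
          && ((test.drop i).take ref.length == ref)) = false := by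
        rw [Bool.and_eq_false_iff]
        right
        simpa [occAt] using hocc
      rw [if_neg (by rw [hcheck]; exact Bool.false_ne_true)]
      rw [ih (i + 1) _ (by omega) hmn (by simp)]
      constructor
      · rintro ⟨k, hk, ho⟩
        exact ⟨k + 1, by omega, by rw [show i + (k + 1) = i + 1 + k from by omega]; exact ho⟩
      · rintro ⟨k, hk, ho⟩
        cases k with
        | zero => exact absurd (by simpa using ho) hocc
        | succ k' =>
          exact ⟨k', by omega, by rw [show i + 1 + k' = i + (k' + 1) from by omega]; exact ho⟩

lemma B_iff (test ref : List Int) :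
    coarse_list_superset_py_alt test ref = true ↔
      ref.length ≤ test.length ∧
        ∃ i, i ≤ test.length - ref.length ∧ occAt test ref i := by
  unfold coarse_list_superset_py_alt
  by_cases h : ref.length > test.length
  · rw [if_pos h]
    simp only [Bool.false_eq_true, false_iff]
    rintro ⟨h1, -⟩; omega
  · rw [if_neg h]
    replace h : ref.length ≤ test.length := by omega
    rw [rkLoop_iff test ref (test.length - ref.length + 1) 0 _ (by omega) h
      (by simp [winSum])]
    constructor
    · rintro ⟨k, hk, ho⟩
      exact ⟨h, k, by omega, by simpa using ho⟩
    · rintro ⟨-, i, hi, ho⟩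
      exact ⟨i, by omega, by simpa using ho⟩

lemma slice_window (test ref : List Int) (i : Nat) :
    (PySem.List.slice test (some (i : Int)) (some ((ref.length : Int) + (i : Int))) == ref) = true
      ↔ occAt test ref i := by
  rw [show ((ref.length : Int) + (i : Int)) = ((i + ref.length : Nat) : Int) from by omega]
  rw [PySem.List.slice_natCast]
  simp [occAt, show i + ref.length - i = ref.length from by omega]

lemma A_iff (test ref : List Int) :
    coarse_list_superset_py test ref = true ↔
      ref.length ≤ test.length ∧
        ((test.length - ref.length = ref.length ∧ occAt test ref 0) ∨
          occAt test ref (test.length - ref.length) ∨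
          ∃ i, 1 ≤ i ∧ i < test.length - ref.length ∧ occAt test ref i) := by
  simp only [coarse_list_superset_py]
  by_cases hmn : ref.length ≤ test.length
  · rw [show ((test.length : Int) - (ref.length : Int)) = ((test.length - ref.length : Nat) : Int) from by omega]
    rw [PySem.List.slice_to_natCast, PySem.List.slice_from_natCast]
    by_cases hc : (test.take (test.length - ref.length) == ref || test.drop (test.length - ref.length) == ref) = true
    · rw [if_pos hc]
      simp only [beq_iff_eq, Bool.or_eq_true] at hc
      constructor
      · intro _
        refine ⟨hmn, ?_⟩
        rcases hc with hc | hc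
        · have hlen := congrArg List.length hc
          simp at hlen
          have hk : test.length - ref.length = ref.length := by omega
          exact Or.inl ⟨hk, by unfold occAt; rw [List.drop_zero, ← hk]; exact hc⟩
        · refine Or.inr (Or.inl ?_)
          unfold occAt
          rw [List.take_of_length_le (by simp; omega)]
          exact hc
      · intro _; rfl
    · rw [if_neg hc]
      simp only [beq_iff_eq, Bool.or_eq_true] at hc
      rw [List.any_eq_true]
      constructor
      · rintro ⟨x, hx, hs⟩
        rw [PySem.List.mem_pyRange_one] at hx
        obtain ⟨i, rfl⟩ : ∃ i : Nat, x = (i : Int) := ⟨x.toNat, by omega⟩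
        rw [slice_window] at hs
        exact ⟨hmn, Or.inr (Or.inr ⟨i, by omega, by omega, hs⟩)⟩
      · rintro ⟨-, ⟨hk, h0⟩ | h | ⟨i, h1, h2, ho⟩⟩
        · exact absurd (Or.inl (by unfold occAt at h0; rw [List.drop_zero] at h0; rw [hk]; exact h0)) hc
        · refine absurd (Or.inr ?_) hc
          unfold occAt at h
          rwa [List.take_of_length_le (by simp; omega)] at h
        · refine ⟨(i : Int), ?_, (slice_window test ref i).2 ho⟩
          rw [PySem.List.mem_pyRange_one]
          omega
  · have hd : ((test.length : Int) - (ref.length : Int)) = -(((ref.length - test.length : Nat)) : Int) := by omega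
    rw [hd]
    have hpos : 0 < ref.length - test.length := by omega
    rw [PySem.List.slice_to_neg_natCast _ _ hpos, PySem.List.slice_from_neg_natCast _ _ hpos]
    rw [if_neg]
    · rw [PySem.List.pyRange_one_eq_nil (by omega)]
      simp only [List.any_nil, Bool.false_eq_true, false_iff]
      rintro ⟨h, -⟩; omega
    · simp only [beq_iff_eq, Bool.or_eq_true, not_or]
      constructor
      · intro h
        have := congrArg List.length h
        simp at this; omega
      · intro h
        have := congrArg List.length h
        simp at this; omega

lemma occAt_zero_iff_prefix (test ref : List Int) : occAt test ref 0 ↔ ref <+: test := by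
  unfold occAt
  rw [List.drop_zero, List.prefix_iff_eq_take]
  exact ⟨fun h => h.symm, fun h => h.symm⟩

lemma infix_drop_one_iff (test ref : List Int) (h : test ≠ []) :
    ref <:+: test.drop 1 ↔
      ∃ i, 1 ≤ i ∧ i ≤ test.length - ref.length ∧ occAt test ref i := by
  constructor
  · rintro ⟨s, t, hst⟩
    have hn : 0 < test.length := List.length_pos_iff.mpr h
    have hl := congrArg List.length hst
    simp at hl
    refine ⟨s.length + 1, by omega, by omega, ?_⟩
    unfold occAt
    have hds : test.drop (s.length + 1) = ref ++ t := by
      rw [show s.length + 1 = 1 + s.length from by omega, ← List.drop_drop, ← hst,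
        List.append_assoc, List.drop_left]
    rw [hds, List.take_left]
  · rintro ⟨i, h1, h2, ho⟩
    have hpre : ref <+: test.drop i := by
      rw [List.prefix_iff_eq_take]
      exact ho.symm
    have hsuf : test.drop i <:+ test.drop 1 := by
      rw [show i = 1 + (i - 1) from by omega, ← List.drop_drop]
      exact List.drop_suffix _ _
    exact hpre.isInfix.trans hsuf.isInfix

-- ===== VERDICT (by name: the statement is the Claim_ definition above) =====
theorem coarse_list_superset_py_spec : Claim_unchanged_coarse_list_superset_py := by
  intro test ref _ hnd
  rw [Bool.eq_iff_iff, A_iff, B_iff]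
  constructor
  · rintro ⟨hmn, ⟨-, h0⟩ | h | ⟨i, h1, h2, ho⟩⟩
    · exact ⟨hmn, 0, by omega, h0⟩
    · exact ⟨hmn, test.length - ref.length, le_refl _, h⟩
    · exact ⟨hmn, i, by omega, ho⟩
  · rintro ⟨hmn, i, hi, ho⟩
    refine ⟨hmn, ?_⟩
    by_cases hi1 : 1 ≤ i
    · rcases Nat.lt_or_ge i (test.length - ref.length) with hlt | hge
      · exact Or.inr (Or.inr ⟨i, hi1, hlt, ho⟩)
      · have : i = test.length - ref.length := by omega
        exact Or.inr (Or.inl (this ▸ ho))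
    · have h0 : occAt test ref 0 := by
        have : i = 0 := by omega
        exact this ▸ ho
      by_cases he : ref = []
      · exact Or.inr (Or.inl (by simp [occAt, he]))
      · by_cases hmn' : ref.length = test.length
        · have hz : test.length - ref.length = 0 := by omega
          exact Or.inr (Or.inl (by rw [hz]; exact h0))
        · by_cases h2m : test.length = 2 * ref.length
          · exact Or.inl ⟨by omega, h0⟩
          · have hpre : ref <+: test := (occAt_zero_iff_prefix test ref).1 h0
            have hinf : ref <:+: test.drop 1 := by
              by_contra hni
              exact hnd ⟨he, hpre, hmn', h2m, hni⟩
            have htne : test ≠ [] := by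
              have hm1 : 0 < ref.length := List.length_pos_iff.mpr he
              have := hpre.length_le
              exact List.ne_nil_of_length_pos (by omega)
            obtain ⟨i', hi'1, hi'2, ho'⟩ := (infix_drop_one_iff test ref htne).1 hinf
            rcases Nat.lt_or_ge i' (test.length - ref.length) with hlt | hge
            · exact Or.inr (Or.inr ⟨i', hi'1, hlt, ho'⟩)
            · have : i' = test.length - ref.length := by omega
              exact Or.inr (Or.inl (this ▸ ho'))

theorem coarse_list_superset_py_changed : Claim_changed_coarse_list_superset_py := by
  unfold Claim_changed_coarse_list_superset_py; decide

theorem coarse_list_superset_py_tight : Claim_exact_coarse_list_superset_py := by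
  intro test ref _ hd
  obtain ⟨he, hpre, hmn', h2m, hni⟩ := hd
  have hmn : ref.length ≤ test.length := hpre.length_le
  have hm1 : 0 < ref.length := List.length_pos_iff.mpr he
  have htne : test ≠ [] := List.ne_nil_of_length_pos (by omega)
  have halt : coarse_list_superset_py_alt test ref = true :=
    (B_iff test ref).2 ⟨hmn, 0, by omega, (occAt_zero_iff_prefix test ref).2 hpre⟩
  have hA : coarse_list_superset_py test ref = false := by
    rw [Bool.eq_false_iff]
    rw [Ne, A_iff]
    rintro ⟨-, ⟨hk, -⟩ | h | ⟨i, h1, h2, ho⟩⟩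
    · exact h2m (by omega)
    · exact hni ((infix_drop_one_iff test ref htne).2
        ⟨test.length - ref.length, by omega, le_refl _, h⟩)
    · exact hni ((infix_drop_one_iff test ref htne).2 ⟨i, h1, by omega, ho⟩)
  rw [hA, halt]
  exact Bool.false_ne_true
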